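-- pv_equiv track=rewrite | github.com/SleepDeprivedVFX/ScriptCannon | operatorCheck.py | oCheck
-- ===== SOURCE A (Python) =====
-- def oCheck(ammo):
--     wadding = False
--     bullets = ['!', '$', '%', '^', '&', '*', '(', '-', '=', '+', '\\', '<', '>', '~', '! ', '$ ', '% ', '^ ', '& ', '* ', '( ', '- ', '= ', '+ ', '\\ ', '< ', '> ', '~ ', '|', '| ', '/', '/ ']
--     for bullet in bullets:
--         checkAmmo = ammo.endswith('%s' % bullet)
--         if checkAmmo == True:
--             wadding = True
--     if wadding == True:
--         return True
--     else:
--         return False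
-- ===== SOURCE B (Python) =====
-- def oCheck(ammo):
--     ops = set('!$%^&*(-=+\\<>~|/')
--     if not ammo:
--         return False
--     if ammo[-1] in ops:
--         return True
--     return ammo[-1] == ' ' and len(ammo) > 1 and ammo[-2] in ops
-- ===== Notes on version B (the rewrite author's own statement) =====
-- stated objective: simpler
-- what changed: Replaces the scan over 32 suffix strings by two positional checks: the last character (or, before a trailing space, the second-to-last) is tested for membership in the 16-character operator set.
import Mathlib
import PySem

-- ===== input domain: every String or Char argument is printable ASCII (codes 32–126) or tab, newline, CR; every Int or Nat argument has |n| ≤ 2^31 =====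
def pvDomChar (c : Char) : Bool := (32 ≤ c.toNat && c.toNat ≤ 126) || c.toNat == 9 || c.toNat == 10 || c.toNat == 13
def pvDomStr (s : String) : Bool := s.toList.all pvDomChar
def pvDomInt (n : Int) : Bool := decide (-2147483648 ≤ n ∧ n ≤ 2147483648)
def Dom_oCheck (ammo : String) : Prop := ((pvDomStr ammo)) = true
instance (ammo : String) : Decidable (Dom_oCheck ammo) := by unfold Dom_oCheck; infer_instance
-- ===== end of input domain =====

-- B replaces A's scan over 32 suffix strings by two positional character checks against the 16-operator set (objective: simpler).


-- ===== PORT A =====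
def oCheck (ammo : String) : Bool :=
  let bullets : List String := ["!", "$", "%", "^", "&", "*", "(", "-", "=", "+", "\\", "<", ">", "~",
    "! ", "$ ", "% ", "^ ", "& ", "* ", "( ", "- ", "= ", "+ ", "\\ ", "< ", "> ", "~ ", "|", "| ", "/", "/ "]
  let wadding := bullets.foldl (fun w b => if PySem.Str.endswith ammo b then true else w) false
  if wadding then true else false

-- ===== PORT B =====
def oCheck_alt (ammo : String) : Bool :=
  let ops : PySem.Set Char := PySem.Set.ofList "!$%^&*(-=+\\<>~|/".toList
  let cs := ammo.toList
  if cs = [] then false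
  else if PySem.Set.contains ops (PySem.List.pyGetD cs (-1) ' ') then true
  else (PySem.List.pyGetD cs (-1) ' ' == ' ') && decide (1 < cs.length)
        && PySem.Set.contains ops (PySem.List.pyGetD cs (-2) ' ')

-- ===== PRECONDITION & SPEC =====
def Spec_oCheck (ammo : String) (out : Bool) : Prop := out = oCheck_alt ammo
instance (ammo : String) (out : Bool) : Decidable (Spec_oCheck ammo out) := by unfold Spec_oCheck; infer_instance

-- ===== CLAIM (what is proved, stated in full; the proofs are below) =====
def Claim_equal_oCheck : Prop := ∀ (ammo : String), Dom_oCheck ammo → Spec_oCheck ammo (oCheck ammo)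

-- ===== LEMMAS AND PROOFS =====

-- A's loop sets wadding once any suffix matches: it computes 'w || l.any p'.
lemma foldl_if_any {α : Type} (l : List α) (p : α → Bool) (w : Bool) :
    l.foldl (fun w b => if p b then true else w) w = (w || l.any p) := by
  induction l generalizing w with
  | nil => simp
  | cons a t ih =>
    rw [List.foldl_cons, ih, List.any_cons]
    cases p a <;> cases w <;> simp

-- Both programs only look at the (up to) last two characters; case on the reversed character list.
lemma main_lemma (s : String) (r : List Char) (hs : s.toList = r.reverse) :
    oCheck s = oCheck_alt s := by
  unfold oCheck oCheck_alt
  simp only [foldl_if_any]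
  match r with
  | [] => simp [hs, PySem.Chars.endswith, List.isSuffixOf]
  | [c] =>
    have hc' : ∀ x : Char, decide (x = c) = decide (c = x) := fun x => by simp [eq_comm]
    simp [hs, PySem.Chars.endswith, List.isSuffixOf, PySem.List.pyGetD,
      PySem.List.pyGet?, PySem.List.pyIdx?, PySem.Set.ofList, PySem.Set.contains]
    simp only [hc']
  | c :: d :: t =>
    have hc' : ∀ x : Char, decide (x = c) = decide (c = x) := fun x => by simp [eq_comm]
    have hd' : ∀ x : Char, decide (x = d) = decide (d = x) := fun x => by simp [eq_comm]
    simp [hs, PySem.Chars.endswith, List.isSuffixOf, PySem.List.pyGetD,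
      PySem.List.pyGet?, PySem.List.pyIdx?, PySem.Set.ofList, PySem.Set.contains]
    simp only [hc', hd']
    by_cases hc : c = ' '
    · subst hc; simp
    · simp [hc]

-- ===== VERDICT (by name: the statement is the Claim_ definition above) =====
theorem oCheck_spec : Claim_equal_oCheck := by
  intro ammo _
  show oCheck ammo = oCheck_alt ammo
  exact main_lemma ammo ammo.toList.reverse (by simp)
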